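-- pv_equiv track=rewrite | github.com/seeyoungm/Lorenzo | lorenzo/reasoning/claim_extractor.py | _match_preference_value
-- ===== SOURCE A (Python) =====
-- def _match_preference_value(
--
--     text: str,
--     mapping: dict[str, tuple[str, ...]],
-- ) -> list[str]:
--     values: list[str] = []
--     for key, tokens in mapping.items():
--         if any(token in text for token in tokens):
--             values.append(key)
--     return values
-- ===== SOURCE B (Python) =====
-- def _match_preference_value(
--     text: str,
--     mapping: dict[str, tuple[str, ...]],
-- ) -> list[str]:
--     # Pass 1: test each DISTINCT token against the text exactly once.
--     seen: set[str] = set()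
--     hits: set[str] = set()
--     for tokens in mapping.values():
--         for token in tokens:
--             if token not in seen:
--                 seen.add(token)
--                 if token in text:
--                     hits.add(token)
--     # Pass 2: a key matches iff one of its tokens was a hit.
--     return [key for key, tokens in mapping.items() if not hits.isdisjoint(tokens)]
-- ===== Notes on version B (the rewrite author's own statement) =====
-- stated objective: alternative
-- what changed: B replaces A's per-key any(token in text) scanning by two passes: a first pass over all token tuples that substring-tests each DISTINCT token against the text exactly once (building a hit set, skipping tokens already seen), then a key pass that keeps keys whose tokens intersect the hit set.
import Mathlib
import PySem

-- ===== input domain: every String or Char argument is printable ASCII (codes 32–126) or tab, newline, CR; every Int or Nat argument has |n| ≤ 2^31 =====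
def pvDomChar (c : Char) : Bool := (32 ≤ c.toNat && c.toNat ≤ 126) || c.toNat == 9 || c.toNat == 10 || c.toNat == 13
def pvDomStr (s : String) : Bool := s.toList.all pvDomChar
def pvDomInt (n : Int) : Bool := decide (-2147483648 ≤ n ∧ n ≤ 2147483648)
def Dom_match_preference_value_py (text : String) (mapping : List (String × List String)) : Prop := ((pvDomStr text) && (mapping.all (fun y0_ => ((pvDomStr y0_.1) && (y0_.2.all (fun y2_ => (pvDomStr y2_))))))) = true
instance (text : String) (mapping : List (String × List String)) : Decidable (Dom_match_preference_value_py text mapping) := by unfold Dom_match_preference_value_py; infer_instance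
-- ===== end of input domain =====

-- B replaces A's per-key substring testing by a first pass that tests each DISTINCT token against
-- the text once (collecting the matching tokens in a set), then a second pass that keeps the keys
-- whose token list meets that hit set; same return value, alternative structure (no speed claim).

-- ===== PORT A =====
-- A: for key, tokens in mapping.items(): if any(token in text for token in tokens): values.append(key)
def match_preference_value_py (text : String) (mapping : List (String × List String)) : List String :=
  ((PySem.Dict.ofList mapping).items).foldl
    (fun values kv =>
      if kv.2.any (fun token => PySem.Str.isIn token text) then values ++ [kv.1] else values)
    []

-- ===== PORT B =====
-- pass 1: fold over mapping.values(), maintaining (seen, hits); pass 2: filter keys by hit-set overlap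
def match_preference_value_py_alt (text : String) (mapping : List (String × List String)) : List String :=
  let d := PySem.Dict.ofList mapping
  let sh : PySem.Set String × PySem.Set String :=
    (d.values).foldl
      (fun st tokens =>
        tokens.foldl
          (fun st token =>
            if PySem.Set.contains st.1 token then st
            else (PySem.Set.add st.1 token,
                  if PySem.Str.isIn token text then PySem.Set.add st.2 token else st.2))
          st)
      (PySem.Set.empty, PySem.Set.empty)
  (d.items).foldl
    (fun vs kv => if !(PySem.Set.isdisjoint sh.2 kv.2) then vs ++ [kv.1] else vs)
    []

-- ===== PRECONDITION & SPEC =====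
def Spec_match_preference_value_py (text : String) (mapping : List (String × List String)) (out : List String) : Prop := out = match_preference_value_py_alt text mapping
instance (text : String) (mapping : List (String × List String)) (out : List String) : Decidable (Spec_match_preference_value_py text mapping out) := by unfold Spec_match_preference_value_py; infer_instance

-- ===== CLAIM (what is proved, stated in full; the proofs are below) =====
def Claim_equal_match_preference_value_py : Prop := ∀ (text : String) (mapping : List (String × List String)), Dom_match_preference_value_py text mapping → Spec_match_preference_value_py text mapping (match_preference_value_py text mapping)

-- ===== LEMMAS AND PROOFS =====

-- the inner (per-tokens) step of B's first pass
def pvStep (text : String) (st : PySem.Set String × PySem.Set String) (token : String) :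
    PySem.Set String × PySem.Set String :=
  if PySem.Set.contains st.1 token then st
  else (PySem.Set.add st.1 token,
        if PySem.Str.isIn token text then PySem.Set.add st.2 token else st.2)

-- invariant of the inner fold: hits = seen ∩ {matching}; seen only grows and absorbs ts
theorem pvInner_inv (text : String) (ts : List String) (seen hits : PySem.Set String)
    (H : ∀ u, u ∈ hits ↔ u ∈ seen ∧ PySem.Str.isIn u text = true) :
    (∀ u, u ∈ (ts.foldl (pvStep text) (seen, hits)).2 ↔
        u ∈ (ts.foldl (pvStep text) (seen, hits)).1 ∧ PySem.Str.isIn u text = true) ∧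
    (∀ u, u ∈ seen → u ∈ (ts.foldl (pvStep text) (seen, hits)).1) ∧
    (∀ u ∈ ts, u ∈ (ts.foldl (pvStep text) (seen, hits)).1) := by
  induction ts generalizing seen hits with
  | nil => exact ⟨H, fun u h => h, by simp⟩
  | cons t ts ih =>
    simp only [List.foldl_cons]
    by_cases hc : t ∈ seen
    · have hstep : pvStep text (seen, hits) t = (seen, hits) := by
        simp [pvStep, hc]
      rw [hstep]
      obtain ⟨h1, h2, h3⟩ := ih seen hits H
      refine ⟨h1, h2, ?_⟩
      intro u hu
      rcases List.mem_cons.mp hu with rfl | hu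
      · exact h2 u hc
      · exact h3 u hu
    · have hstep : pvStep text (seen, hits) t
          = (PySem.Set.add seen t,
             if PySem.Str.isIn t text then PySem.Set.add hits t else hits) := by
        simp [pvStep, hc]
      rw [hstep]
      have H' : ∀ u, u ∈ (if PySem.Str.isIn t text then PySem.Set.add hits t else hits) ↔
          u ∈ PySem.Set.add seen t ∧ PySem.Str.isIn u text = true := by
        intro u
        by_cases hm : PySem.Str.isIn t text = true
        · simp only [hm, if_pos, PySem.Set.mem_add]
          constructor
          · rintro (hu | rfl)
            · rcases (H u).mp hu with ⟨hs, hi⟩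
              exact ⟨Or.inl hs, hi⟩
            · exact ⟨Or.inr rfl, hm⟩
          · rintro ⟨hs | rfl, hi⟩
            · exact Or.inl ((H u).mpr ⟨hs, hi⟩)
            · exact Or.inr rfl
        · simp only [hm, if_neg, Bool.not_eq_true, PySem.Set.mem_add]
          constructor
          · intro hu
            rcases (H u).mp hu with ⟨hs, hi⟩
            exact ⟨Or.inl hs, hi⟩
          · rintro ⟨hs | rfl, hi⟩
            · exact (H u).mpr ⟨hs, hi⟩
            · exact absurd hi hm
      obtain ⟨h1, h2, h3⟩ := ih (PySem.Set.add seen t) _ H'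
      refine ⟨h1, ?_, ?_⟩
      · intro u hu
        exact h2 u ((PySem.Set.mem_add _ _ _).mpr (Or.inl hu))
      · intro u hu
        rcases List.mem_cons.mp hu with rfl | hu
        · exact h2 u ((PySem.Set.mem_add _ _ _).mpr (Or.inr rfl))
        · exact h3 u hu

-- invariant of the outer fold over the token lists
theorem pvOuter_inv (text : String) (tls : List (List String)) (seen hits : PySem.Set String)
    (H : ∀ u, u ∈ hits ↔ u ∈ seen ∧ PySem.Str.isIn u text = true) :
    (∀ u, u ∈ (tls.foldl (fun st ts => ts.foldl (pvStep text) st) (seen, hits)).2 ↔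
        u ∈ (tls.foldl (fun st ts => ts.foldl (pvStep text) st) (seen, hits)).1 ∧
          PySem.Str.isIn u text = true) ∧
    (∀ u, u ∈ seen → u ∈ (tls.foldl (fun st ts => ts.foldl (pvStep text) st) (seen, hits)).1) ∧
    (∀ ts ∈ tls, ∀ u ∈ ts, u ∈ (tls.foldl (fun st ts => ts.foldl (pvStep text) st) (seen, hits)).1) := by
  induction tls generalizing seen hits with
  | nil => exact ⟨H, fun u h => h, by simp⟩
  | cons ts tls ih =>
    simp only [List.foldl_cons]
    obtain ⟨h1, h2, h3⟩ := pvInner_inv text ts seen hits H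
    obtain ⟨g1, g2, g3⟩ := ih (ts.foldl (pvStep text) (seen, hits)).1
      (ts.foldl (pvStep text) (seen, hits)).2 h1
    refine ⟨by simpa using g1, ?_, ?_⟩
    · intro u hu
      exact by simpa using g2 u (h2 u hu)
    · intro ts0 hts0 u hu
      rcases List.mem_cons.mp hts0 with rfl | hts0
      · exact by simpa using g2 u (h3 u hu)
      · exact by simpa using g3 ts0 hts0 u hu

-- the two passes over the key/token pairs produce the same key list
theorem pvMain (text : String) (items : List (String × List String)) :
    items.foldl
        (fun values kv =>
          if kv.2.any (fun token => PySem.Str.isIn token text) then values ++ [kv.1] else values)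
        []
      = items.foldl
          (fun vs kv =>
            if !(PySem.Set.isdisjoint
                  ((items.map (·.2)).foldl (fun st ts => ts.foldl (pvStep text) st)
                    (PySem.Set.empty, PySem.Set.empty)).2 kv.2)
            then vs ++ [kv.1] else vs)
          [] := by
  obtain ⟨h1, _, h3⟩ := pvOuter_inv text (items.map (·.2)) PySem.Set.empty PySem.Set.empty
    (by simp [PySem.Set.empty])
  refine (PySem.List.foldl_congr_mem items _ _ [] ?_).symm
  intro acc kv hkv
  have hiff : (PySem.Set.isdisjoint
        ((items.map (·.2)).foldl (fun st ts => ts.foldl (pvStep text) st)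
          (PySem.Set.empty, PySem.Set.empty)).2 kv.2 = false)
      ↔ (kv.2.any (fun token => PySem.Str.isIn token text) = true) := by
    constructor
    · intro hd
      have : ¬ (∀ x ∈ ((items.map (·.2)).foldl (fun st ts => ts.foldl (pvStep text) st)
          (PySem.Set.empty, PySem.Set.empty)).2, x ∉ kv.2) := by
        intro hall
        rw [(PySem.Set.isdisjoint_iff _ _).mpr hall] at hd
        exact absurd hd (by decide)
      push Not at this
      obtain ⟨x, hxh, hxk⟩ := this
      exact List.any_eq_true.mpr ⟨x, hxk, ((h1 x).mp hxh).2⟩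
    · intro ha
      obtain ⟨t, htk, hti⟩ := List.any_eq_true.mp ha
      have hts : t ∈ ((items.map (·.2)).foldl (fun st ts => ts.foldl (pvStep text) st)
          (PySem.Set.empty, PySem.Set.empty)).1 :=
        h3 kv.2 (List.mem_map.mpr ⟨kv, hkv, rfl⟩) t htk
      have hth : t ∈ ((items.map (·.2)).foldl (fun st ts => ts.foldl (pvStep text) st)
          (PySem.Set.empty, PySem.Set.empty)).2 := (h1 t).mpr ⟨hts, hti⟩
      cases hb : PySem.Set.isdisjoint
          ((items.map (·.2)).foldl (fun st ts => ts.foldl (pvStep text) st)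
            (PySem.Set.empty, PySem.Set.empty)).2 kv.2 with
      | false => rfl
      | true => exact absurd ((PySem.Set.isdisjoint_iff _ _).mp hb t hth) (by simp [htk])
  have hcond : (!(PySem.Set.isdisjoint
        ((items.map (·.2)).foldl (fun st ts => ts.foldl (pvStep text) st)
          (PySem.Set.empty, PySem.Set.empty)).2 kv.2))
      = kv.2.any (fun token => PySem.Str.isIn token text) := by
    cases hb : PySem.Set.isdisjoint
        ((items.map (·.2)).foldl (fun st ts => ts.foldl (pvStep text) st)
          (PySem.Set.empty, PySem.Set.empty)).2 kv.2 with
    | false => rw [hiff.mp hb]; rfl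
    | true =>
      cases hb2 : kv.2.any (fun token => PySem.Str.isIn token text) with
      | false => rfl
      | true =>
        rw [hiff.mpr hb2] at hb
        exact absurd hb (by decide)
  rw [hcond]

-- ===== VERDICT (by name: the statement is the Claim_ definition above) =====
theorem match_preference_value_py_spec : Claim_equal_match_preference_value_py := by
  intro text mapping _
  show match_preference_value_py text mapping = match_preference_value_py_alt text mapping
  exact pvMain text (PySem.Dict.ofList mapping).items
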